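-- pv_equiv track=rewrite | github.com/L3cr0f/pma_course | Scripts/Labs/Lab_21/lab21_01_filename_decoding.py | decode_filename
-- ===== SOURCE A (Python) =====
-- MAX_VALUE_1 = 0xFF
--
-- MAX_VALUE_2 = 0xFFFFFFFF
--
-- def sar_32(byte, width):
-- 	sign = byte & 0x80000000
-- 	byte &= 0x7FFFFFFF
-- 	byte >>= width
-- 	byte |= sign
-- 	return byte
--
-- def decode_filename(filename):
-- 	name = ""
-- 	extension = filename[3:]
--
-- 	for counter in range(3):
-- 		character = ord(filename[counter])
-- 		constant = 0x4EC4EC4F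
--
-- 		character = (character & MAX_VALUE_1) - 0x61
-- 		character = (character * character) & MAX_VALUE_2
-- 		character = character - 0x5
-- 		value = ((character * constant) & 0xFFFFFFFF00000000) >> 0x20
--
-- 		value = sar_32(value, 3)
-- 		aux_value = (value >> 0x1F) & MAX_VALUE_2
-- 		value = (value + aux_value) & MAX_VALUE_2
-- 		value = (value * 0x1A) & MAX_VALUE_2
-- 		character = character - value
--
-- 		if character < 0:
-- 			character = (character & MAX_VALUE_1) + 0x1A
-- 		character = (character & MAX_VALUE_1) + 0x61
--
-- 		name = name + chr(character)
--
-- 	expected_filename = name + extension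
-- 	return expected_filename
-- ===== SOURCE B (Python) =====
-- # Table-driven decoder: a 26-entry lookup string built once (squares generated
-- # incrementally from odd numbers, no multiplication or magic-constant division),
-- # then each of the first three chars is decoded by a single table lookup.
-- _TABLE = []
-- _sq = 0
-- for _r in range(26):
--     _TABLE.append(chr((_sq + 21) % 26 + 0x61))
--     _sq += 2 * _r + 1
-- _TABLE = "".join(_TABLE)
--
-- def decode_filename(filename):
--     return "".join(
--         _TABLE[((ord(ch) & 0xFF) - 0x61) % 26] for ch in filename[:3]
--     ) + filename[3:]
-- ===== Notes on version B (the rewrite author's own statement) =====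
-- stated objective: alternative
-- what changed: Replaced A's per-character magic-constant 32-bit reciprocal-division pipeline (0x4EC4EC4F multiply, sar_32, sign fixup, *0x1A subtraction, negative-branch patch-up) with a 26-entry lookup table precomputed once by incremental odd-number square generation; each of the first three chars is decoded by one table index.
import Mathlib
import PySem

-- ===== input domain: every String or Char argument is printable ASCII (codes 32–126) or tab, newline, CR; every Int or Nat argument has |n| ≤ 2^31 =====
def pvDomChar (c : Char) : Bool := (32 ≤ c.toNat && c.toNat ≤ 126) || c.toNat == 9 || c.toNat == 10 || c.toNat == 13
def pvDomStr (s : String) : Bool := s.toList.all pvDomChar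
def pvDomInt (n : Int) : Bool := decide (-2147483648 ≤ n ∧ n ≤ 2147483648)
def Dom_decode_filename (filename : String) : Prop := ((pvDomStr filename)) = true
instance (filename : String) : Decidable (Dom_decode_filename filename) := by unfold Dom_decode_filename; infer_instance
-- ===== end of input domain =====

-- B replaces A's per-character magic-constant division arithmetic with one precomputed
-- 26-entry lookup table (built by incremental odd-number square generation); objective: alternative.

-- ===== PORT A =====
def sar_32 (byte : Int) (width : Nat) : Int :=
  let sign := PySem.Int.band byte 0x80000000
  let byte := PySem.Int.band byte 0x7FFFFFFF
  let byte := byte >>> width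
  PySem.Int.bor byte sign

-- loop body of A (one character); kept line-for-line
def decode_filename_body (c0 : Int) : Int :=
  let character := c0
  let constant : Int := 0x4EC4EC4F
  let character := PySem.Int.band character 0xFF - 0x61
  let character := PySem.Int.band (character * character) 0xFFFFFFFF
  let character := character - 0x5
  let value := (PySem.Int.band (character * constant) 0xFFFFFFFF00000000) >>> 0x20
  let value := sar_32 value 3
  let aux_value := PySem.Int.band (value >>> 0x1F) 0xFFFFFFFF
  let value := PySem.Int.band (value + aux_value) 0xFFFFFFFF
  let value := PySem.Int.band (value * 0x1A) 0xFFFFFFFF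
  let character := character - value
  let character := if character < 0 then PySem.Int.band character 0xFF + 0x1A else character
  PySem.Int.band character 0xFF + 0x61

def decode_filename (filename : String) : String :=
  let name : String := ""
  let extension := String.ofList (PySem.List.slice filename.toList (some 3) none)
  let name := (PySem.List.pyRange 0 3 1).foldl (fun name counter =>
      -- filename[counter] raises IndexError when out of range; excluded by Pre_
      let character := (((PySem.List.pyGet? filename.toList counter).getD 'a').toNat : Int)
      let character := decode_filename_body character
      name.push (Char.ofNat character.toNat)) name
  name ++ extension

-- ===== PORT B =====
-- the module-level table: for r = 0..25 append chr((r²+21) % 26 + 0x61), squares kept incrementally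
def decode_table : String :=
  let st := (PySem.List.pyRange 0 26 1).foldl
    (fun (st : List Char × Int) r =>
      (st.1 ++ [Char.ofNat (PySem.Int.mod (st.2 + 21) 26 + 0x61).toNat], st.2 + 2 * r + 1))
    ([], 0)
  String.ofList st.1

def decode_filename_alt (filename : String) : String :=
  String.ofList ((PySem.List.slice filename.toList none (some 3)).map (fun ch =>
    (PySem.List.pyGet? decode_table.toList
        (PySem.Int.mod (PySem.Int.band (ch.toNat : Int) 0xFF - 0x61) 26)).getD ' '))
  ++ String.ofList (PySem.List.slice filename.toList (some 3) none)

-- ===== PRECONDITION & SPEC =====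
-- Pre_ excludes filenames shorter than 3 characters, on which A raises IndexError.
def Pre_decode_filename (filename : String) : Prop := 3 ≤ filename.toList.length
instance (filename : String) : Decidable (Pre_decode_filename filename) := by unfold Pre_decode_filename; infer_instance
def pvWitness_decode_filename : String := "abc.txt"

def Spec_decode_filename (filename : String) (out : String) : Prop := out = decode_filename_alt filename
instance (filename : String) (out : String) : Decidable (Spec_decode_filename filename out) := by unfold Spec_decode_filename; infer_instance

-- ===== CLAIM (what is proved, stated in full; the proofs are below) =====
def Claim_equal_decode_filename : Prop := ∀ (filename : String), Dom_decode_filename filename → Pre_decode_filename filename → Spec_decode_filename filename (decode_filename filename)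

-- ===== LEMMAS AND PROOFS =====

-- per-character agreement: A's arithmetic pipeline ≡ B's table lookup, for any ASCII code
set_option maxRecDepth 8192 in
lemma body_eq (n : Nat) (h : n ≤ 126) :
    Char.ofNat (decode_filename_body (n : Int)).toNat =
    (PySem.List.pyGet? decode_table.toList
        (PySem.Int.mod (PySem.Int.band ((n : Nat) : Int) 0xFF - 0x61) 26)).getD ' ' := by
  revert h; revert n; decide

-- ===== VERDICT (by name: the statement is the Claim_ definition above) =====
theorem decode_filename_spec : Claim_equal_decode_filename := by
  intro f hdom hpre
  unfold Spec_decode_filename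
  unfold Pre_decode_filename at hpre
  obtain ⟨a, b, c, rest, h⟩ : ∃ a b c rest, f.toList = a :: b :: c :: rest := by
    rcases hl : f.toList with _ | ⟨a, t⟩
    · rw [hl] at hpre; simp at hpre
    · rcases t with _ | ⟨b, t⟩
      · rw [hl] at hpre; simp at hpre
      · rcases t with _ | ⟨c, t⟩
        · rw [hl] at hpre; simp at hpre
        · exact ⟨a, b, c, t, rfl⟩
  unfold Dom_decode_filename pvDomStr at hdom
  rw [h] at hdom
  simp only [List.all_cons, Bool.and_eq_true] at hdom
  have ha : a.toNat ≤ 126 := by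
    have := hdom.1; unfold pvDomChar at this; simp at this; omega
  have hb : b.toNat ≤ 126 := by
    have := hdom.2.1; unfold pvDomChar at this; simp at this; omega
  have hc : c.toNat ≤ 126 := by
    have := hdom.2.2.1; unfold pvDomChar at this; simp at this; omega
  apply String.toList_inj.mp
  have r3 : PySem.List.pyRange 0 3 1 = [0, 1, 2] := by decide
  have cast0 : ((0 : Nat) : Int) = (0 : Int) := by norm_num
  have cast1 : ((1 : Nat) : Int) = (1 : Int) := by norm_num
  have cast2 : ((2 : Nat) : Int) = (2 : Int) := by norm_num
  have g0 : PySem.List.pyGet? (a :: b :: c :: rest) (0 : Int) = some a := by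
    rw [← cast0, PySem.List.pyGet?_natCast]; simp
  have g1 : PySem.List.pyGet? (a :: b :: c :: rest) (1 : Int) = some b := by
    rw [← cast1, PySem.List.pyGet?_natCast]; simp
  have g2 : PySem.List.pyGet? (a :: b :: c :: rest) (2 : Int) = some c := by
    rw [← cast2, PySem.List.pyGet?_natCast]; simp
  have s1 : PySem.List.slice (a :: b :: c :: rest) none (some 3) = [a, b, c] := by
    simp [PySem.List.slice]
  have s2 : PySem.List.slice (a :: b :: c :: rest) (some 3) none = rest := by
    simp [PySem.List.slice]
  simp only [decode_filename, decode_filename_alt, h, r3, List.foldl_cons, List.foldl_nil,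
    g0, g1, g2, Option.getD_some, s1, s2, List.map_cons, List.map_nil]
  rw [← body_eq a.toNat ha, ← body_eq b.toNat hb, ← body_eq c.toNat hc]
  simp
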